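/- GENERATED by mk_final_copies.py from the proof of the farm's unit `start_decoder.C11c` (farm:start_decoder.C11c.1: Proof.lean) as the
   re-elaboration sweep compiled it — do not edit. -/
import Asan.CheckWalk
import Vorbis.Spec.Reader
import Vorbis.Spec.StartDecoderC4
import Vorbis.Spec.Units.start_decoder_C11c
import Vorbis.Spec.Worked.start_decoder_C11c_Lemmas

open X86 X86.User Asan Vorbis Vorbis.Spec Vorbis.Spec.StartDecoder

set_option maxRecDepth 4000
set_option maxHeartbeats 4000000

namespace Vorbis.Spec.start_decoder_C11c

/-- **Segment C11c of `start_decoder`** (`cut155` 0x114c26, the return of `get_bits(f, 1)`): the checked byte store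
`c->sequence_p = bl` (`[c + 26]`), the checked test `c->lookup_type == 1` (`[c + 25]`: `In11P.type_12` leaves 1 or 2).
TYPE 2 (0x114c49, stb_vorbis_fixed.c:3887): the checked loads of `entries`, `dimensions`, the 32-bit `imul` (no wrap: `prod32`), the
checked store `c->lookup_values` and the join 0x114c6f: `exit_type2` builds `In11V`.
TYPE 1 (0x114cfb, stb_vorbis_fixed.c:3883): the checked loads of `dimensions`, `entries` and `call lookup1_values` (an ordinary
`ShadowPre` callee, footprint = its stack); at its return 0x114d1a `exit_type1` builds `At11T`.
Every check site is inside the codebooks block (`ArenaOK.block_acc_inv`), as in C11f. -/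
theorem segC11c_walk {Lay : Layout} (hLay : Lay.hi = 0x1000000) {μ : Microarch} (hμ : UserX.MicroOK μ) {u₀ : State}
    (hcode : HasCodeNat Lay u₀ Vorbis.L.start_decoder.entry Vorbis.Code.code_start_decoder.nat Vorbis.L.start_decoder.size)
    (hst4 : Asan.SmallCheck Lay μ Vorbis.WayInv (Vorbis.CodeOK u₀) [.rax, .rcx, .rdx] 4 Vorbis.L.__asan_store4_noabort.entry)
    (hst1 : Asan.SmallCheck Lay μ Vorbis.WayInv (Vorbis.CodeOK u₀) [.rax, .rdx] 1 Vorbis.L.__asan_store1_noabort.entry)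
    (hld1 : Asan.SmallCheck Lay μ Vorbis.WayInv (Vorbis.CodeOK u₀) [.rax, .rdx] 1 Vorbis.L.__asan_load1_noabort.entry)
    (hld4 : Asan.SmallCheck Lay μ Vorbis.WayInv (Vorbis.CodeOK u₀) [.rax, .rcx, .rdx] 4 Vorbis.L.__asan_load4_noabort.entry)
    (hl1v : ∀ (others : List Obj) (frames : List (Nat × FrameLayout)), Calls Lay μ Vorbis.WayInv (Vorbis.conv u₀) Vorbis.L.lookup1_values.entry (Vorbis.Spec.lookup1_values.spec others frames))
    {g : Ghost} {i : Nat} {A2 A3 Ai : Arena} {A : Arena × List Obj} {v : State}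
    (hat : In11P u₀ g i A2 A3 Ai A Vorbis.L.start_decoder.cut155 v)
    (hvb : 1 ≤ Codebook.value_bits v.mem (g.cb v.mem i) ∧ Codebook.value_bits v.mem (g.cb v.mem i) ≤ 16) :
    ReachVia Lay μ WayInv v (fun w => At11V u₀ g i w ∨ At11T u₀ g i w) := by
  have hfr := hat.frame
  have he := hfr.entry
  v_entry he
  simp only [depth] at he_room he_stack
  have w_rip := hfr.rip
  obtain ⟨hr1, hr2⟩ := hfr.r_eq
  simp only [steady] at hr1
  have hRA : g.RA = (g.e.reg .rsp).toNat := rfl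
  have c_rsp : v.reg .rsp = g.e.reg .rsp - 1480 := by
    rw [hfr.rsp]
    refine (eq_addr _ _ ?_).symm
    unfold Ghost.R Ghost.RA steady
    u_omega
  -- the struct `c = cb(i)`: inside the codebooks block, a setup block of the arena
  have ha := hat.cur.sd.arena
  have hcb := hat.cur.ages.cbOK
  have hBA : A.1.Blk (codebooksBlock v.mem g.f) := hcb.F2.mono hat.cur.ages.exti
  have hcin := hcb.cb_in i hat.cur.lt
  have hboff := ha.block_off hBA
  have hbin := arena_inside ha hBA
  have hbnd := ha.bounds
  simp only [vblock, Off.sizeof.Codebook] at hcin hboff hbin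
  have hcdef : stb_vorbis.codebooks_at v.mem g.f i = g.cb v.mem i := rfl
  rw [hcdef] at hcin
  have c_r14n : (v.reg .r14).toNat = g.cb v.mem i := by
    rw [hat.cur.r14]
    exact toNat_addr _ (by omega)
  have hBA' : A.1.Block (stb_vorbis.codebooks v.mem g.f) (2120 * (stb_vorbis.codebook_count v.mem g.f).toNat) := hBA
  have hst := C4.obj_stack hfr hat.cur.hand
  have htx := hat.cur.hand.arenaText
  simp only [Vorbis.L.textHi] at htx
  have w_eq : Mem.EqOn Vorbis.L.textLo Vorbis.L.textHi u₀.mem v.mem := hfr.code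
  have hdf : v.flags .df = false := (show abiInv _ from hfr.inv).1
  have hmx : v.mxcsr &&& 0x1F80 = 0x1F80 := (show abiInv _ from hfr.inv).2
  have hsse := Vorbis.sseOK_of_abiInv hfr.inv
  have e26 : v.reg .r14 + 26 = addr (g.cb v.mem i + 26) := by
    rw [hat.cur.r14]
    exact Vorbis.addr_add_lit _ 26
  have e25 : v.reg .r14 + 25 = addr (g.cb v.mem i + 25) := by
    rw [hat.cur.r14]
    exact Vorbis.addr_add_lit _ 25
  have e28 : v.reg .r14 + 28 = addr (g.cb v.mem i + 28) := by
    rw [hat.cur.r14]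
    exact Vorbis.addr_add_lit _ 28
  have e4 : v.reg .r14 + 4 = addr (g.cb v.mem i + 4) := by
    rw [hat.cur.r14]
    exact Vorbis.addr_add_lit _ 4
  have t26 : (v.reg .r14 + 26).toNat = g.cb v.mem i + 26 := by
    rw [e26]
    exact toNat_addr _ (by omega)
  have t25 : (v.reg .r14 + 25).toNat = g.cb v.mem i + 25 := by
    rw [e25]
    exact toNat_addr _ (by omega)
  have t28 : (v.reg .r14 + 28).toNat = g.cb v.mem i + 28 := by
    rw [e28]
    exact toNat_addr _ (by omega)
  have t4 : (v.reg .r14 + 4).toNat = g.cb v.mem i + 4 := by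
    rw [e4]
    exact toNat_addr _ (by omega)
  have t1 : (g.e.reg .rsp - 1488).toNat = (g.e.reg .rsp).toNat - 1488 := by u_omega
  have hl1v' := hl1v A.2 g.frames'
  u_walk hcode [hμ.vendor] until [Vorbis.L.start_decoder.at_114c6f] span [Vorbis.L.textLo, Vorbis.L.textHi] side (v_side)
  case check_114c2c =>
    have hun : ShadowUntouched v.mem s_114c2c.mem := by v_untouched
    have hsh' := hfr.shadow.untouched hun
    refine ⟨hsh'.sealed, ?_⟩
    rw [t26]
    exact ha.block_acc_inv hsh' hBA' (by omega) (by omega) (by decide)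
  case check_114c39 =>
    have hun : ShadowUntouched v.mem s_114c39.mem := by v_untouched
    have hsh' := hfr.shadow.untouched hun
    refine ⟨hsh'.sealed, ?_⟩
    rw [t25]
    exact ha.block_acc_inv hsh' hBA' (by omega) (by omega) (by decide)
  case check_114cfe =>
    have hun : ShadowUntouched v.mem s_114cfe.mem := by v_untouched
    have hsh' := hfr.shadow.untouched hun
    refine ⟨hsh'.sealed, ?_⟩
    rw [c_r14n]
    exact ha.block_acc_inv hsh' hBA' (by omega) (by omega) (by decide)
  case check_114d0a =>
    have hun : ShadowUntouched v.mem s_114d0a.mem := by v_untouched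
    have hsh' := hfr.shadow.untouched hun
    refine ⟨hsh'.sealed, ?_⟩
    rw [t4]
    exact ha.block_acc_inv hsh' hBA' (by omega) (by omega) (by decide)
  case call_inv => v_inv
  case pre_114d15 =>
    have hun : ShadowUntouched v.mem s_114d15.mem := by v_untouched
    have hsh' := hfr.shadow.untouched hun
    refine ⟨?_, hfr.offText⟩
    have e : (s_114d15.reg .rsp).toNat + 8 = g.R := by
      rw [w_rsp, t1]
      omega
    rw [e]
    exact hsh'
  case check_114c4d =>
    have hun : ShadowUntouched v.mem s_114c4d.mem := by v_untouched
    have hsh' := hfr.shadow.untouched hun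
    refine ⟨hsh'.sealed, ?_⟩
    rw [t4]
    exact ha.block_acc_inv hsh' hBA' (by omega) (by omega) (by decide)
  case check_114c59 =>
    have hun : ShadowUntouched v.mem s_114c59.mem := by v_untouched
    have hsh' := hfr.shadow.untouched hun
    refine ⟨hsh'.sealed, ?_⟩
    rw [c_r14n]
    exact ha.block_acc_inv hsh' hBA' (by omega) (by omega) (by decide)
  case check_114c66 =>
    have hun : ShadowUntouched v.mem s_114c66.mem := by v_untouched
    have hsh' := hfr.shadow.untouched hun
    refine ⟨hsh'.sealed, ?_⟩
    rw [t28]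
    exact ha.block_acc_inv hsh' hBA' (by omega) (by omega) (by decide)
  · -- 0x114d1a, the return of lookup1_values (type 1): `At11T`
    v_after_call w_rsp_114d15 w_mem_114d15
    have hall : Mem.SameExcept [⟨g.R - 408, g.R⟩, ⟨g.cb v.mem i + 26, g.cb v.mem i + 27⟩] v.mem s_114d15r.mem := by
      u_same
    have hq : ∀ x, x ∈ [(⟨g.R - 408, g.R⟩ : Span), ⟨g.cb v.mem i + 26, g.cb v.mem i + 27⟩] →
        (g.R - 408 ≤ x.lo ∧ x.hi ≤ g.R) ∨ (g.cb v.mem i + 26 ≤ x.lo ∧ x.hi ≤ g.cb v.mem i + 27) := by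
      intro x hx
      simp only [List.mem_cons, List.mem_nil_iff, or_false] at hx
      rcases hx with rfl | rfl
      · left
        exact ⟨Nat.le_refl _, Nat.le_refl _⟩
      · right
        exact ⟨Nat.le_refl _, Nat.le_refl _⟩
    have hun : ShadowUntouched v.mem s_114d15r.mem := by v_untouched
    have habi : abiInv s_114d15r := Vorbis.abiInv_of w_df w_mx
    have hrsp : s_114d15r.reg .rsp = v.reg .rsp := by
      rw [w_rsp, c_rsp]
    have hb : v.mem.readLE (v.reg .r14 + 25) 1 < 256 := Mem.readLE_lt' v.mem _ 1
    have hty : Codebook.lookup_type v.mem (g.cb v.mem i) = 1 := by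
      have e : Codebook.lookup_type v.mem (g.cb v.mem i) = v.mem.readLE (v.reg .r14 + 25) 1 := by
        rw [e25]
        simp only [vacc, voff, Mem.u8]
      rw [e]
      omega
    exact ReachVia.done (Or.inr (exit_type1 hat hvb hall hun hq w_rip hrsp (Vorbis.conv_code_eqOn w_code) habi
      (w_kept .r14 rfl) hty))
  · -- 0x114c6f, the join (type 2): `At11V`
    have hall : Mem.SameExcept [⟨g.R - 408, g.R⟩, ⟨g.cb v.mem i + 26, g.cb v.mem i + 27⟩,
        ⟨g.cb v.mem i + 28, g.cb v.mem i + 32⟩] v.mem s_114c6b.mem := by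
      u_same
    have hq : ∀ x, x ∈ [(⟨g.R - 408, g.R⟩ : Span), ⟨g.cb v.mem i + 26, g.cb v.mem i + 27⟩,
        ⟨g.cb v.mem i + 28, g.cb v.mem i + 32⟩] → Win11c g (g.cb v.mem i) x := by
      intro x hx
      simp only [List.mem_cons, List.mem_nil_iff, or_false] at hx
      unfold Win11c
      rcases hx with rfl | rfl | rfl
      · left
        exact ⟨Nat.le_refl _, Nat.le_refl _⟩
      · right
        left
        exact ⟨Nat.le_refl _, Nat.le_refl _⟩
      · right
        right
        exact ⟨Nat.le_refl _, Nat.le_refl _⟩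
    have hun : ShadowUntouched v.mem s_114c6b.mem := by v_untouched
    have habi : abiInv s_114c6b := by
      refine Vorbis.abiInv_of ?_ ?_
      · rw [w_flags]
        exact w_df_114c66
      · rw [w_mxcsr]
        exact hmx
    have hrsp : s_114c6b.reg .rsp = v.reg .rsp := by
      rw [w_rsp, c_rsp]
    have hb : v.mem.readLE (v.reg .r14 + 25) 1 < 256 := Mem.readLE_lt' v.mem _ 1
    have hne : ¬ Codebook.lookup_type v.mem (g.cb v.mem i) = 1 := by
      have e : Codebook.lookup_type v.mem (g.cb v.mem i) = v.mem.readLE (v.reg .r14 + 25) 1 := by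
        rw [e25]
        simp only [vacc, voff, Mem.u8]
      rw [e]
      omega
    have hlv : s_114c6b.mem.readLE (addr (g.cb v.mem i + 28)) 4 =
        (BitVec.ofNat 32 (v.mem.readLE (addr (g.cb v.mem i + 4)) 4) *
          BitVec.ofNat 32 (v.mem.readLE (addr (g.cb v.mem i)) 4)).toNat := by
      rw [w_mem, ← e28, ← e4, ← hat.cur.r14, Mem.readLE_writeLE_same _ _ 4 _ (by decide)]
      generalize BitVec.ofNat 32 (v.mem.readLE (v.reg .r14 + 4) 4) * BitVec.ofNat 32 (v.mem.readLE (v.reg .r14) 4) = p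
      have hp := p.isLt
      omega
    exact ReachVia.done (Or.inl ⟨A, A2, A3, Ai, exit_type2 hat hvb hall hun hq w_rip hrsp w_eq habi (w_kept .r14 rfl) hne hlv⟩)

end Vorbis.Spec.start_decoder_C11c

/-- The unit `start_decoder.C11c`: `segC11c_walk` at every entry state. -/
theorem Vorbis.Spec.Worked.start_decoder_C11c_ok : Vorbis.Spec.start_decoder_C11c.Statement := by
  intro Lay hLay μ hμ u₀ hcode hst4 hst1 hld1 hld4 hl1v g i v hat
  obtain ⟨A, A2, A3, Ai, h, hvb⟩ := hat
  exact Vorbis.Spec.start_decoder_C11c.segC11c_walk hLay hμ hcode hst4 hst1 hld1 hld4 hl1v h hvb
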